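-- pv_equiv track=rewrite | github.com/rsleiberin/open-darf | scripts/run_scierc_official_dict.py | predict_spans
-- ===== SOURCE A (Python) =====
-- def norm(s):
--     if s is None:
--         return None
--     if isinstance(s, list):
--         s = " ".join(map(str, s))
--     s = str(s).strip().lower()
--     return " ".join(s.split())
--
-- def predict_spans(rec, term2label, max_len=6):
--     preds = []
--     toks = rec.get("tokens") or rec.get("words") or rec.get("sentences")
--     if not isinstance(toks, list):
--         return preds
--     for si, sent in enumerate(toks):
--         if not isinstance(sent, list):
--             continue
--         n = len(sent)
--         used = [False] * n
--         # Greedy longest-match to reduce overlaps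
--         for L in range(min(max_len, n), 0, -1):
--             i = 0
--             while i + L <= n:
--                 if any(used[i : i + L]):
--                     i += 1
--                     continue
--                 phrase = norm(" ".join(sent[i : i + L]))
--                 lab = term2label.get(phrase)
--                 if lab:
--                     preds.append((si, i, i + L - 1, lab))
--                     for k in range(i, i + L):
--                         used[k] = True
--                     i += L
--                 else:
--                     i += 1
--     return preds
-- ===== SOURCE B (Python) =====
-- def norm(s):
--     if s is None:
--         return None
--     if isinstance(s, list):
--         s = " ".join(map(str, s))
--     s = str(s).strip().lower()
--     return " ".join(s.split())
--
-- def predict_spans(rec, term2label, max_len=6):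
--     preds = []
--     toks = rec.get("tokens") or rec.get("words") or rec.get("sentences")
--     if not isinstance(toks, list):
--         return preds
--     for si, sent in enumerate(toks):
--         if not isinstance(sent, list):
--             continue
--         n = len(sent)
--         # Pass 1: one left-to-right scan collecting every dictionary hit,
--         # bucketed by span length (buckets[L] is in ascending-start order).
--         buckets = [[] for _ in range(min(max_len, n) + 1)]
--         for i in range(n):
--             for L in range(1, min(max_len, n - i) + 1):
--                 lab = term2label.get(norm(" ".join(sent[i:i + L])))
--                 if lab:
--                     buckets[L].append((i, lab))
--         # Pass 2: resolve overlaps greedily, longest spans first.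
--         used = [False] * n
--         for L in range(len(buckets) - 1, 0, -1):
--             for i, lab in buckets[L]:
--                 if not any(used[i:i + L]):
--                     preds.append((si, i, i + L - 1, lab))
--                     for k in range(i, i + L):
--                         used[k] = True
--     return preds
-- ===== Notes on version B (the rewrite author's own statement) =====
-- stated objective: alternative
-- what changed: A's per-length jump-scan with interleaved marking is replaced by a two-phase decomposition: one ascending scan collects all dictionary hits into per-length buckets, then a separate longest-first pass resolves overlaps with the used[] array.
import Mathlib
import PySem

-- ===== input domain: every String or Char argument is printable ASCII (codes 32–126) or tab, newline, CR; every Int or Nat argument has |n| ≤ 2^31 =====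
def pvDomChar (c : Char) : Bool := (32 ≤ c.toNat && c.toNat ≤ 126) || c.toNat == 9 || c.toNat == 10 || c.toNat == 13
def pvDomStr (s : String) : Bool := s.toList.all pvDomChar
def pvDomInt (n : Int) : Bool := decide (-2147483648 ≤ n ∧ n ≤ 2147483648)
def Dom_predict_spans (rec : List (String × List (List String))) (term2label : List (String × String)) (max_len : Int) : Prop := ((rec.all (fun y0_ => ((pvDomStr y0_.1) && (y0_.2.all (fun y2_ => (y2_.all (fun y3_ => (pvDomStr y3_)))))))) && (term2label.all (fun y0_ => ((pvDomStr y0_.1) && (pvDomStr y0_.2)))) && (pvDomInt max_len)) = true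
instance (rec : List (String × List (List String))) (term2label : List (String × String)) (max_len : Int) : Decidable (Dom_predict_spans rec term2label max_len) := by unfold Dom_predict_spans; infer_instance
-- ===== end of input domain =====

-- B replaces A's per-length jump-scan by one candidate-collection pass bucketed by span
-- length plus a separate longest-first overlap-resolution pass (objective: alternative).

-- ===== PORT A =====
-- shared leaf helpers (the helper `norm` and the phrase/lookup/slice/mark lines are
-- textually identical in both Python sources, so both ports use them)

-- norm(s) restricted to a str argument: " ".join(str(s).strip().lower().split())
def pvNorm (s : String) : String :=
  PySem.Str.join " " (PySem.Str.split₀ (PySem.Str.lower (PySem.Str.strip s)))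

-- `lab = term2label.get(norm(" ".join(sent[i:i+L])))` followed by the truthiness test
-- `if lab:` (None and "" both fall to the else branch, which does the same thing)
def pvHit? (term2label : List (String × String)) (sent : List String) (i L : Int) : Option String :=
  match (PySem.Dict.mk term2label).get? (pvNorm (PySem.Str.join " " (PySem.List.slice sent (some i) (some (i + L))))) with
  | some lab => if lab = "" then none else some lab
  | none => none

-- any(used[i : i + L])
def pvBlocked (used : List Bool) (i L : Int) : Bool :=
  (PySem.List.slice used (some i) (some (i + L))).any (fun b => b)

-- for k in range(i, i + L): used[k] = True
def pvMark (used : List Bool) (i L : Int) : List Bool :=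
  (PySem.List.pyRange i (i + L) 1).foldl (fun u k => PySem.List.pySetD u k true) used

-- Python `or` on dict-lookup results: None and [] are falsy
def pvOrTruthy (a b : Option (List (List String))) : Option (List (List String)) :=
  match a with
  | some l => if l = [] then b else some l
  | none => b

-- rec.get("tokens") or rec.get("words") or rec.get("sentences")
def pvToks (rec : List (String × List (List String))) : Option (List (List String)) :=
  pvOrTruthy (pvOrTruthy ((PySem.Dict.mk rec).get? "tokens") ((PySem.Dict.mk rec).get? "words"))
    ((PySem.Dict.mk rec).get? "sentences")

-- A's inner `while i + L <= n:` loop; fuel counts remaining iterations (sent.length is enough)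
def pvScanA (term2label : List (String × String)) (sent : List String) (si L n : Int) :
    Nat → Int → List Bool × List (Int × Int × Int × String) → List Bool × List (Int × Int × Int × String)
  | 0, _, st => st
  | fuel + 1, i, (used, preds) =>
    if i + L ≤ n then
      if pvBlocked used i L then
        pvScanA term2label sent si L n fuel (i + 1) (used, preds)
      else
        match pvHit? term2label sent i L with
        | some lab =>
            pvScanA term2label sent si L n fuel (i + L)
              (pvMark used i L, preds ++ [(si, i, i + L - 1, lab)])
        | none => pvScanA term2label sent si L n fuel (i + 1) (used, preds)
    else (used, preds)

def predict_spans (rec : List (String × List (List String))) (term2label : List (String × String)) (max_len : Int) : List (Int × Int × Int × String) :=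
  match pvToks rec with
  | none => []
  | some toks =>
    (PySem.List.enumerate toks 0).foldl
      (fun preds p =>
        let sent := p.2
        let n : Int := (sent.length : Int)
        ((PySem.List.pyRange (min max_len n) 0 (-1)).foldl
            (fun st L => pvScanA term2label sent p.1 L n sent.length 0 st)
            (List.replicate sent.length false, preds)).2)
      []

-- ===== PORT B =====
-- pass 1: buckets[L] collects, in ascending-start order, every span of length L whose
-- normalized join is a (truthy) dictionary hit
def pvBuckets (term2label : List (String × String)) (sent : List String) (max_len : Int) :
    List (List (Int × String)) :=
  let n : Int := (sent.length : Int)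
  (PySem.List.pyRange 0 n 1).foldl
    (fun bks i =>
      (PySem.List.pyRange 1 (min max_len (n - i) + 1) 1).foldl
        (fun bks L =>
          match pvHit? term2label sent i L with
          | some lab => PySem.List.pySetD bks L (PySem.List.pyGetD bks L [] ++ [(i, lab)])
          | none => bks)
        bks)
    ((PySem.List.pyRange 0 (min max_len n + 1) 1).map (fun _ => []))

-- pass 2 body: `if not any(used[i:i+L]): preds.append(…); mark`
def pvSelect (si L : Int) (st : List Bool × List (Int × Int × Int × String)) (c : Int × String) :
    List Bool × List (Int × Int × Int × String) :=
  if pvBlocked st.1 c.1 L then st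
  else (pvMark st.1 c.1 L, st.2 ++ [(si, c.1, c.1 + L - 1, c.2)])

def predict_spans_alt (rec : List (String × List (List String))) (term2label : List (String × String)) (max_len : Int) : List (Int × Int × Int × String) :=
  match pvToks rec with
  | none => []
  | some toks =>
    (PySem.List.enumerate toks 0).foldl
      (fun preds p =>
        let sent := p.2
        let buckets := pvBuckets term2label sent max_len
        ((PySem.List.pyRange ((buckets.length : Int) - 1) 0 (-1)).foldl
            (fun st L => (PySem.List.pyGetD buckets L []).foldl (pvSelect p.1 L) st)
            (List.replicate sent.length false, preds)).2)
      []

-- ===== PRECONDITION & SPEC =====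
def Spec_predict_spans (rec : List (String × List (List String))) (term2label : List (String × String)) (max_len : Int) (out : List (Int × Int × Int × String)) : Prop := out = predict_spans_alt rec term2label max_len
instance (rec : List (String × List (List String))) (term2label : List (String × String)) (max_len : Int) (out : List (Int × Int × Int × String)) : Decidable (Spec_predict_spans rec term2label max_len out) := by unfold Spec_predict_spans; infer_instance

-- ===== CLAIM (what is proved, stated in full; the proofs are below) =====
def Claim_equal_predict_spans : Prop := ∀ (rec : List (String × List (List String))) (term2label : List (String × String)) (max_len : Int), Dom_predict_spans rec term2label max_len → Spec_predict_spans rec term2label max_len (predict_spans rec term2label max_len)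

-- ===== LEMMAS AND PROOFS =====

-- the candidates of length L whose start lies in [a, b), in ascending-start order
def candsIn (term2label : List (String × String)) (sent : List String) (L a b : Int) :
    List (Int × String) :=
  (PySem.List.pyRange a b 1).filterMap (fun i => (pvHit? term2label sent i L).map (fun lab => (i, lab)))

theorem candsIn_append (t2l : List (String × String)) (sent : List String) (L a m b : Int)
    (h1 : a ≤ m) (h2 : m ≤ b) :
    candsIn t2l sent L a b = candsIn t2l sent L a m ++ candsIn t2l sent L m b := by
  unfold candsIn
  rw [PySem.List.pyRange_one_append a m b h1 h2, List.filterMap_append]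

theorem mem_candsIn {t2l : List (String × String)} {sent : List String} {L a b : Int}
    {c : Int × String} (hc : c ∈ candsIn t2l sent L a b) : a ≤ c.1 ∧ c.1 < b := by
  unfold candsIn at hc
  obtain ⟨i, hi, hmap⟩ := List.mem_filterMap.1 hc
  obtain ⟨lab, _, rfl⟩ := Option.map_eq_some_iff.1 hmap
  exact (PySem.List.mem_pyRange_one.1 hi)

-- marking a range preserves the length
theorem setRange_length (ks : List Int) (used : List Bool) :
    (ks.foldl (fun u k => PySem.List.pySetD u k true) used).length = used.length := by
  induction ks generalizing used with
  | nil => rfl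
  | cons k ks ih => simp [List.foldl_cons, ih, PySem.List.length_pySetD]

theorem pvMark_length (used : List Bool) (i L : Int) :
    (pvMark used i L).length = used.length := setRange_length _ _

-- entries below the marked range are untouched
theorem setRange_getElem?_lt (a b : Int) (used : List Bool) (k : Nat) (hk : (k : Int) < a) :
    ((PySem.List.pyRange a b 1).foldl (fun u j => PySem.List.pySetD u j true) used)[k]? = used[k]? := by
  by_cases hab : a < b
  · rw [PySem.List.pyRange_one_cons hab, List.foldl_cons]
    have h0 : 0 ≤ a := le_of_lt (lt_of_le_of_lt (Int.natCast_nonneg k) hk)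
    rw [setRange_getElem?_lt (a + 1) b _ k (by omega)]
    rw [PySem.List.pySetD_of_nonneg _ _ h0]
    exact List.getElem?_set_ne (by omega)
  · rw [PySem.List.pyRange_one_eq_nil (by omega)]; rfl
termination_by (b - a).toNat
decreasing_by omega

-- entries in the marked range become true
theorem setRange_getElem? (a b : Int) (used : List Bool) (h0 : 0 ≤ a)
    (hb : b ≤ (used.length : Int)) (k : Nat) (hak : a ≤ (k : Int)) (hkb : (k : Int) < b) :
    ((PySem.List.pyRange a b 1).foldl (fun u j => PySem.List.pySetD u j true) used)[k]? = some true := by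
  have hab : a < b := lt_of_le_of_lt hak hkb
  rw [PySem.List.pyRange_one_cons hab, List.foldl_cons, PySem.List.pySetD_of_nonneg _ _ h0]
  by_cases hka : (k : Int) = a
  · rw [setRange_getElem?_lt (a + 1) b _ k (by omega)]
    have ha : a.toNat = k := by omega
    rw [ha, List.getElem?_set_self']
    have hklen : k < used.length := by omega
    simp [List.getElem?_eq_getElem hklen]
  · exact setRange_getElem? (a + 1) b _ (by omega) (by simpa) k (by omega) hkb
termination_by (b - a).toNat
decreasing_by omega

theorem pvMark_getElem? (used : List Bool) (a L : Int) (h0 : 0 ≤ a)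
    (hb : a + L ≤ (used.length : Int)) (k : Nat) (hak : a ≤ (k : Int)) (hkb : (k : Int) < a + L) :
    (pvMark used a L)[k]? = some true :=
  setRange_getElem? a (a + L) used h0 hb k hak hkb

-- a window that contains a true cell is blocked
theorem pvBlocked_of_getElem (used : List Bool) (i L : Int) (h0 : 0 ≤ i) (hL : 1 ≤ L)
    (_hn : i + L ≤ (used.length : Int)) (h : used[i.toNat]? = some true) :
    pvBlocked used i L = true := by
  unfold pvBlocked
  rw [PySem.List.slice_toNat _ h0 (by omega)]
  refine List.any_eq_true.2 ⟨true, ?_, rfl⟩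
  refine List.mem_of_getElem? (i := 0) ?_
  rw [List.getElem?_take_of_lt (by omega), List.getElem?_drop]
  simpa using h

-- after marking [a, a+L), every window of length L starting inside [a, a+L) is blocked
theorem pvBlocked_mark (used : List Bool) (a L i : Int) (h0 : 0 ≤ a) (hL : 1 ≤ L)
    (hai : a ≤ i) (hia : i < a + L) (_hn : i + L ≤ (used.length : Int)) :
    pvBlocked (pvMark used a L) i L = true := by
  have hlen : ((pvMark used a L).length : Int) = (used.length : Int) := by
    rw [pvMark_length]
  refine pvBlocked_of_getElem _ i L (by omega) hL (by omega) ?_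
  refine pvMark_getElem? used a L h0 (by omega) i.toNat (by omega) (by omega)

-- folding the selection over all-blocked candidates changes nothing
theorem sel_skip (si L : Int) (l : List (Int × String))
    (st : List Bool × List (Int × Int × Int × String))
    (h : ∀ c ∈ l, pvBlocked st.1 c.1 L = true) :
    l.foldl (pvSelect si L) st = st := by
  induction l with
  | nil => rfl
  | cons c l ih =>
    rw [List.foldl_cons]
    have hc : pvSelect si L st c = st := by
      unfold pvSelect; rw [h c List.mem_cons_self]; rfl
    rw [hc]
    exact ih (fun c hcl => h c (List.mem_cons_of_mem _ hcl))

-- the selection fold preserves the used-array length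
theorem sel_len (si L : Int) (l : List (Int × String))
    (st : List Bool × List (Int × Int × Int × String)) :
    (l.foldl (pvSelect si L) st).1.length = st.1.length := by
  induction l generalizing st with
  | nil => rfl
  | cons c l ih =>
    rw [List.foldl_cons, ih]
    unfold pvSelect
    split
    · rfl
    · exact pvMark_length _ _ _

-- generic fold invariant
theorem foldl_inv {α β : Type} (l : List α) (f : β → α → β) (P : β → Prop)
    (h : ∀ b a, P b → a ∈ l → P (f b a)) (init : β) (hi : P init) : P (l.foldl f init) := by
  induction l generalizing init with
  | nil => exact hi
  | cons x l ih =>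
    exact ih (fun b a hb ha => h b a hb (List.mem_cons_of_mem _ ha)) _
      (h init x hi List.mem_cons_self)

-- fold congruence under an invariant of the right-hand function
theorem foldl_congr_inv {α β : Type} (l : List α) (f g : β → α → β) (P : β → Prop)
    (hfg : ∀ b a, P b → a ∈ l → f b a = g b a) (hgP : ∀ b a, P b → a ∈ l → P (g b a))
    (init : β) (hi : P init) : l.foldl f init = l.foldl g init := by
  induction l generalizing init with
  | nil => rfl
  | cons x l ih =>
    rw [List.foldl_cons, List.foldl_cons, hfg init x hi List.mem_cons_self]
    exact ih (fun b a hb ha => hfg b a hb (List.mem_cons_of_mem _ ha))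
      (fun b a hb ha => hgP b a hb (List.mem_cons_of_mem _ ha)) _
      (hgP init x hi List.mem_cons_self)

theorem candsIn_nil (t2l : List (String × String)) (sent : List String) (L a b : Int)
    (h : b ≤ a) : candsIn t2l sent L a b = [] := by
  unfold candsIn
  rw [PySem.List.pyRange_one_eq_nil h]
  rfl

theorem candsIn_cons (t2l : List (String × String)) (sent : List String) (L a b : Int)
    (h : a < b) :
    candsIn t2l sent L a b =
      (match pvHit? t2l sent a L with | some lab => [(a, lab)] | none => []) ++
        candsIn t2l sent L (a + 1) b := by
  unfold candsIn
  rw [PySem.List.pyRange_one_cons h, List.filterMap_cons]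
  cases pvHit? t2l sent a L <;> simp

theorem candsIn_singleton (t2l : List (String × String)) (sent : List String) (L a : Int) :
    candsIn t2l sent L a (a + 1) =
      (match pvHit? t2l sent a L with | some lab => [(a, lab)] | none => []) := by
  rw [candsIn_cons t2l sent L a (a + 1) (by omega), candsIn_nil t2l sent L (a + 1) (a + 1) le_rfl]
  simp

-- MAIN per-length lemma: A's jump-scan from position a equals B's selection fold over
-- the ascending candidate list with starts in [a, n-L+1)
theorem scanA_eq (t2l : List (String × String)) (sent : List String) (si L : Int)
    (hL : 1 ≤ L) :
    ∀ (fuel : Nat) (a : Int) (used : List Bool) (preds : List (Int × Int × Int × String)),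
      0 ≤ a → used.length = sent.length → ((sent.length : Int) - a).toNat ≤ fuel →
      pvScanA t2l sent si L (sent.length : Int) fuel a (used, preds) =
        (candsIn t2l sent L a ((sent.length : Int) - L + 1)).foldl (pvSelect si L) (used, preds) := by
  intro fuel
  induction fuel with
  | zero =>
    intro a used preds h0 hlen hfuel
    rw [candsIn_nil t2l sent L a _ (by omega)]
    rfl
  | succ fuel ih =>
    intro a used preds h0 hlen hfuel
    show (if a + L ≤ (sent.length : Int) then _ else _) = _
    by_cases hcond : a + L ≤ (sent.length : Int)
    · rw [if_pos hcond]
      have hlt : a < (sent.length : Int) - L + 1 := by omega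
      rw [candsIn_cons t2l sent L a _ hlt]
      by_cases hblk : pvBlocked used a L = true
      · rw [if_pos hblk]
        have hskip :
            ((match pvHit? t2l sent a L with | some lab => [(a, lab)] | none => []) :
                List (Int × String)).foldl (pvSelect si L) (used, preds) = (used, preds) := by
          cases pvHit? t2l sent a L with
          | none => rfl
          | some lab =>
            show pvSelect si L (used, preds) (a, lab) = (used, preds)
            unfold pvSelect
            rw [if_pos hblk]
        rw [List.foldl_append, hskip]
        exact ih (a + 1) used preds (by omega) hlen (by omega)
      · rw [if_neg hblk]
        cases hhit : pvHit? t2l sent a L with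
        | none =>
          show pvScanA t2l sent si L (sent.length : Int) fuel (a + 1) (used, preds) =
            List.foldl (pvSelect si L) (used, preds)
              (([] : List (Int × String)) ++ candsIn t2l sent L (a + 1) ((sent.length : Int) - L + 1))
          rw [List.nil_append]
          exact ih (a + 1) used preds (by omega) hlen (by omega)
        | some lab =>
          show pvScanA t2l sent si L (sent.length : Int) fuel (a + L)
              (pvMark used a L, preds ++ [(si, a, a + L - 1, lab)]) =
            List.foldl (pvSelect si L) (used, preds)
              (([(a, lab)] : List (Int × String)) ++ candsIn t2l sent L (a + 1) ((sent.length : Int) - L + 1))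
          have hsel : pvSelect si L (used, preds) (a, lab) =
              (pvMark used a L, preds ++ [(si, a, a + L - 1, lab)]) := by
            unfold pvSelect
            rw [if_neg hblk]
          rw [List.foldl_append]
          have hfoldhd :
              ([(a, lab)] : List (Int × String)).foldl (pvSelect si L) (used, preds) =
                (pvMark used a L, preds ++ [(si, a, a + L - 1, lab)]) := by
            show pvSelect si L (used, preds) (a, lab) = _
            exact hsel
          rw [hfoldhd]
          set st' : List Bool × List (Int × Int × Int × String) :=
            (pvMark used a L, preds ++ [(si, a, a + L - 1, lab)]) with hst'
          have hlen' : st'.1.length = sent.length := by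
            rw [hst']
            exact (pvMark_length used a L).trans hlen
          set m : Int := min (a + L) ((sent.length : Int) - L + 1) with hm
          have hsplit : candsIn t2l sent L (a + 1) ((sent.length : Int) - L + 1) =
              candsIn t2l sent L (a + 1) m ++ candsIn t2l sent L m ((sent.length : Int) - L + 1) :=
            candsIn_append t2l sent L (a + 1) m _ (by omega) (by omega)
          rw [hsplit, List.foldl_append]
          have hseg : (candsIn t2l sent L (a + 1) m).foldl (pvSelect si L) st' = st' := by
            refine sel_skip si L _ st' ?_
            intro c hc
            have hb := mem_candsIn hc
            rw [hst']
            refine pvBlocked_mark used a L c.1 h0 hL (by omega) (by omega) ?_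
            have : (used.length : Int) = (sent.length : Int) := by omega
            omega
          rw [hseg]
          have htail : candsIn t2l sent L m ((sent.length : Int) - L + 1) =
              candsIn t2l sent L (a + L) ((sent.length : Int) - L + 1) := by
            by_cases hc2 : a + L ≤ (sent.length : Int) - L + 1
            · rw [hm, min_eq_left hc2]
            · rw [candsIn_nil t2l sent L m _ (by omega),
                candsIn_nil t2l sent L (a + L) _ (by omega)]
          rw [htail]
          obtain ⟨used', preds'⟩ := st'
          have hlen'' : used'.length = sent.length := hlen'
          exact ih (a + L) used' preds' (by omega) hlen'' (by omega)
    · rw [if_neg hcond]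
      rw [candsIn_nil t2l sent L a _ (by omega)]
      rfl

-- length of the bucket array
theorem buckets_length (t2l : List (String × String)) (sent : List String) (max_len : Int) :
    (pvBuckets t2l sent max_len).length = (min max_len (sent.length : Int) + 1).toNat := by
  unfold pvBuckets
  simp only []
  refine foldl_inv _ _ (fun bks : List (List (Int × String)) => bks.length = (min max_len (sent.length : Int) + 1).toNat) ?_ _ ?_
  · intro bks i hb _
    refine foldl_inv _ _
      (fun bks' : List (List (Int × String)) => bks'.length = (min max_len (sent.length : Int) + 1).toNat)
      ?_ _ hb
    intro bks' L hb' _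
    cases pvHit? t2l sent i L with
    | none => exact hb'
    | some lab =>
      show (PySem.List.pySetD bks' L _).length = _
      rw [PySem.List.length_pySetD]
      exact hb'
  · simp only [List.length_map, PySem.List.length_pyRange_one]
    omega

-- one pass of B's collection loop at position i appends the hit at (i, L) to bucket L
theorem inner_step (t2l : List (String × String)) (sent : List String) (top : Int)
    (i bound : Int) (hbd : bound ≤ top + 1) (bks : List (List (Int × String)))
    (hlen : bks.length = (top + 1).toNat) (c : Int) (hc : 0 ≤ c) :
    ((PySem.List.pyRange c bound 1).foldl
        (fun bks L =>
          match pvHit? t2l sent i L with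
          | some lab => PySem.List.pySetD bks L (PySem.List.pyGetD bks L [] ++ [(i, lab)])
          | none => bks)
        bks).length = bks.length ∧
    ∀ L : Int, 0 ≤ L → PySem.List.pyGetD
        ((PySem.List.pyRange c bound 1).foldl
          (fun bks L =>
            match pvHit? t2l sent i L with
            | some lab => PySem.List.pySetD bks L (PySem.List.pyGetD bks L [] ++ [(i, lab)])
            | none => bks)
          bks) L [] =
      PySem.List.pyGetD bks L [] ++
        (if c ≤ L ∧ L < bound then
          (match pvHit? t2l sent i L with | some lab => [(i, lab)] | none => [])
        else []) := by
  by_cases hcb : c < bound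
  · rw [PySem.List.pyRange_one_cons hcb, List.foldl_cons]
    cases hhit : pvHit? t2l sent i c with
    | none =>
      simp only []
      obtain ⟨hl, hg⟩ := inner_step t2l sent top i bound hbd bks hlen (c + 1) (by omega)
      refine ⟨hl, ?_⟩
      intro L hL
      rw [hg L hL]
      by_cases hLc : L = c
      · rw [hLc, if_neg (by omega), if_pos ⟨le_rfl, hcb⟩, hhit]
      · congr 1
        by_cases h1 : c + 1 ≤ L ∧ L < bound
        · rw [if_pos h1, if_pos ⟨by omega, h1.2⟩]
        · rw [if_neg h1, if_neg (by omega)]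
    | some lab =>
      simp only []
      have hclen : c.toNat < bks.length := by omega
      obtain ⟨hl, hg⟩ := inner_step t2l sent top i bound hbd
        (PySem.List.pySetD bks c (PySem.List.pyGetD bks c [] ++ [(i, lab)]))
        (by rw [PySem.List.length_pySetD]; exact hlen) (c + 1) (by omega)
      constructor
      · rw [hl, PySem.List.length_pySetD]
      · intro L hL
        rw [hg L hL]
        by_cases hLc : L = c
        · have hgot : PySem.List.pyGetD
              (PySem.List.pySetD bks c (PySem.List.pyGetD bks c [] ++ [(i, lab)])) c ([] : List (Int × String)) =
              PySem.List.pyGetD bks c [] ++ [(i, lab)] := by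
            rw [show (c : Int) = (c.toNat : Int) from by omega]
            simp only [PySem.List.pyGetD_natCast, PySem.List.pySetD_natCast]
            rw [List.getD_eq_getElem?_getD, List.getElem?_set_self']
            simp [List.getElem?_eq_getElem hclen]
          rw [hLc, if_neg (by omega), if_pos ⟨le_rfl, hcb⟩, hhit, hgot]
          simp
        · have hLne : PySem.List.pyGetD
              (PySem.List.pySetD bks c (PySem.List.pyGetD bks c [] ++ [(i, lab)])) L ([] : List (Int × String)) =
              PySem.List.pyGetD bks L ([] : List (Int × String)) := by
            rw [show L = (L.toNat : Int) from by omega]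
            simp only [PySem.List.pyGetD_natCast]
            rw [PySem.List.pySetD_of_nonneg _ _ hc]
            rw [List.getD_eq_getElem?_getD, List.getD_eq_getElem?_getD,
              List.getElem?_set_ne (by omega)]
          rw [hLne]
          congr 1
          by_cases h1 : c + 1 ≤ L ∧ L < bound
          · rw [if_pos h1, if_pos ⟨by omega, h1.2⟩]
          · rw [if_neg h1, if_neg (by omega)]
  · rw [PySem.List.pyRange_one_eq_nil (by omega)]
    refine ⟨rfl, ?_⟩
    intro L _
    rw [if_neg (by omega)]
    simp
termination_by (bound - c).toNat
decreasing_by all_goals omega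

-- bucket lemma: bucket L of B's collection pass is exactly the ascending candidate list
theorem buckets_get (t2l : List (String × String)) (sent : List String) (max_len L : Int)
    (h1 : 1 ≤ L) (h2 : L ≤ min max_len (sent.length : Int)) :
    PySem.List.pyGetD (pvBuckets t2l sent max_len) L [] =
      candsIn t2l sent L 0 ((sent.length : Int) - L + 1) := by
  have key : ∀ (m : Nat), m ≤ sent.length →
      (((PySem.List.pyRange 0 (m : Int) 1).foldl
          (fun bks i =>
            (PySem.List.pyRange 1 (min max_len ((sent.length : Int) - i) + 1) 1).foldl
              (fun bks L =>
                match pvHit? t2l sent i L with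
                | some lab => PySem.List.pySetD bks L (PySem.List.pyGetD bks L [] ++ [(i, lab)])
                | none => bks)
              bks)
          ((PySem.List.pyRange 0 (min max_len (sent.length : Int) + 1) 1).map (fun _ => []))).length =
        (min max_len (sent.length : Int) + 1).toNat) ∧
      ∀ L' : Int, 1 ≤ L' → L' ≤ min max_len (sent.length : Int) →
        PySem.List.pyGetD
          ((PySem.List.pyRange 0 (m : Int) 1).foldl
            (fun bks i =>
              (PySem.List.pyRange 1 (min max_len ((sent.length : Int) - i) + 1) 1).foldl
                (fun bks L =>
                  match pvHit? t2l sent i L with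
                  | some lab => PySem.List.pySetD bks L (PySem.List.pyGetD bks L [] ++ [(i, lab)])
                  | none => bks)
                bks)
            ((PySem.List.pyRange 0 (min max_len (sent.length : Int) + 1) 1).map (fun _ => []))) L' [] =
          candsIn t2l sent L' 0 (min (m : Int) ((sent.length : Int) - L' + 1)) := by
    intro m
    induction m with
    | zero =>
      intro _
      constructor
      · simp only [Nat.cast_zero]
        rw [PySem.List.pyRange_one_eq_nil le_rfl]
        simp only [List.foldl_nil, List.length_map, PySem.List.length_pyRange_one]
        omega
      · intro L' hL1 hL2
        simp only [Nat.cast_zero]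
        rw [PySem.List.pyRange_one_eq_nil le_rfl]
        simp only [List.foldl_nil]
        rw [PySem.List.pyGetD_map_pyRange_of_nonneg _ _ _ _ (by omega) (by omega)]
        rw [candsIn_nil t2l sent L' 0 _ (by omega)]
    | succ m ihm =>
      intro hm
      obtain ⟨ihl, ihg⟩ := ihm (by omega)
      have hsp : PySem.List.pyRange 0 ((m : Int) + 1) 1 =
          PySem.List.pyRange 0 (m : Int) 1 ++ [(m : Int)] :=
        PySem.List.pyRange_one_succ_right (by omega)
      rw [show ((m + 1 : Nat) : Int) = (m : Int) + 1 by omega, hsp, List.foldl_append,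
        List.foldl_cons, List.foldl_nil]
      obtain ⟨stl, stg⟩ := inner_step t2l sent (min max_len (sent.length : Int)) (m : Int)
        (min max_len ((sent.length : Int) - (m : Int)) + 1) (by omega) _ ihl 1 (by omega)
      refine ⟨by rw [stl, ihl], ?_⟩
      intro L' hL1 hL2
      rw [stg L' (by omega), ihg L' hL1 hL2]
      by_cases hcase : (m : Int) ≤ (sent.length : Int) - L'
      · rw [if_pos ⟨hL1, by omega⟩]
        rw [min_eq_left (by omega), min_eq_left (by omega)]
        rw [candsIn_append t2l sent L' 0 (m : Int) ((m : Int) + 1) (by omega) (by omega)]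
        rw [candsIn_singleton]
      · rw [if_neg (by omega)]
        rw [min_eq_right (by omega), min_eq_right (by omega), List.append_nil]
  obtain ⟨_, hg⟩ := key sent.length le_rfl
  have := hg L h1 h2
  rw [min_eq_right (show (sent.length : Int) - L + 1 ≤ (sent.length : Int) by omega)] at this
  unfold pvBuckets
  simp only []
  exact this

-- per-sentence equality
theorem sentence_eq (t2l : List (String × String)) (sent : List String) (si max_len : Int)
    (preds : List (Int × Int × Int × String)) :
    ((PySem.List.pyRange (min max_len (sent.length : Int)) 0 (-1)).foldl
        (fun st L => pvScanA t2l sent si L (sent.length : Int) sent.length 0 st)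
        (List.replicate sent.length false, preds)).2 =
      ((PySem.List.pyRange (((pvBuckets t2l sent max_len).length : Int) - 1) 0 (-1)).foldl
          (fun st L => (PySem.List.pyGetD (pvBuckets t2l sent max_len) L []).foldl (pvSelect si L) st)
          (List.replicate sent.length false, preds)).2 := by
  have hbl : ((pvBuckets t2l sent max_len).length : Int) =
      ((min max_len (sent.length : Int) + 1).toNat : Int) := by
    rw [buckets_length]
  by_cases htop : min max_len (sent.length : Int) ≤ 0
  · rw [PySem.List.pyRange_neg_one_eq_nil htop,
      PySem.List.pyRange_neg_one_eq_nil (by rw [hbl]; omega)]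
    rfl
  · have hrange : ((pvBuckets t2l sent max_len).length : Int) - 1 =
        min max_len (sent.length : Int) := by
      rw [hbl]; omega
    rw [hrange]
    congr 1
    refine foldl_congr_inv _ _ _ (fun st => st.1.length = sent.length) ?_ ?_ _ ?_
    · intro st L hst hL
      have hLr := PySem.List.mem_pyRange_neg_one.1 hL
      obtain ⟨used, preds'⟩ := st
      rw [scanA_eq t2l sent si L (by omega) sent.length 0 used preds' le_rfl hst (by omega)]
      rw [buckets_get t2l sent max_len L (by omega) (by omega)]
    · intro st L hst _
      rw [sel_len]
      exact hst
    · simp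

-- ===== VERDICT (by name: the statement is the Claim_ definition above) =====
theorem predict_spans_spec : Claim_equal_predict_spans := by
  intro rec t2l max_len _
  unfold Spec_predict_spans predict_spans predict_spans_alt
  cases pvToks rec with
  | none => rfl
  | some toks =>
    simp only []
    refine PySem.List.foldl_congr_mem _ _ _ _ ?_
    intro preds p _
    exact sentence_eq t2l p.2 p.1 max_len preds
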